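-- pv_equiv track=rewrite | github.com/xiaxinz/FontUSE | usecase_gen.py | split_usecases
-- ===== SOURCE A (Python) =====
-- def split_usecases(usecases):
--     """
--     Split usecases into 3 segments based on rules:
--     - If len >= 4: [first], [second], [rest...]
--     - If len == 3: [0], [1], [2]
--     - If len == 2: [0], [1], []
--     - If len == 1: [0], [], []
--     - If len == 0: [], [], []
--     Returns a list of three lists: [part1, part2, part3].
--     """
--     if not isinstance(usecases, list):
--         usecase_list = [usecases] if usecases else []
--     else:
--         usecase_list = [str(u) for u in usecases if u]
--
--     n = len(usecase_list)
--
--     if n >= 4: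
--         return [
--             [usecase_list[0]],
--             [usecase_list[1]],
--             usecase_list[2:],
--         ]
--     elif n == 3:
--         return [
--             [usecase_list[0]],
--             [usecase_list[1]],
--             [usecase_list[2]],
--         ]
--     elif n == 2:
--         return [
--             [usecase_list[0]],
--             [usecase_list[1]],
--             [],
--         ]
--     elif n == 1:
--         return [
--             [usecase_list[0]],
--             [],
--             [],
--         ]
--     else:
--         return [[], [], []]
-- ===== SOURCE B (Python) =====
-- def split_usecases(usecases):
--     """One streaming pass: drop each kept item into the first non-full slot
--     (part1 holds one, part2 holds one, part3 the rest); no length cascade."""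
--     parts = [[], [], []]
--     if not isinstance(usecases, list):
--         if usecases:
--             parts[0].append(usecases)
--         return parts
--     for u in usecases:
--         if not u:
--             continue
--         u = str(u)
--         if not parts[0]:
--             parts[0].append(u)
--         elif not parts[1]:
--             parts[1].append(u)
--         else:
--             parts[2].append(u)
--     return parts
-- ===== Notes on version B (the rewrite author's own statement) =====
-- stated objective: alternative
-- what changed: Instead of building a filtered intermediate list, taking its length and branching five ways with indexing/slicing, B makes a single streaming pass with a three-slot accumulator, dropping each kept item into the first non-full slot (part1 capacity 1, part2 capacity 1, part3 the rest).
import Mathlib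
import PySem

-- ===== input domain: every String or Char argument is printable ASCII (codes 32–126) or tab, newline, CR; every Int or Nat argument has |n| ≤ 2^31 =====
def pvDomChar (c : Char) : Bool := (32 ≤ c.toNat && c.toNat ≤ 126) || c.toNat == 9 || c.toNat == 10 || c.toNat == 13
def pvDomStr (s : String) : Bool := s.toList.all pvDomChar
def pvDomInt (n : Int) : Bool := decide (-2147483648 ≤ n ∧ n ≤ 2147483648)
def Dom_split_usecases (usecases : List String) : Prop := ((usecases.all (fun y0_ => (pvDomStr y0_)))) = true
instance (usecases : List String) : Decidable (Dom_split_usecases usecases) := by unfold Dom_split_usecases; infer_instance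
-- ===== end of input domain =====

-- ===== PORT A =====
-- Header: B replaces A's filtered-list + length cascade with a single streaming pass over
-- the input using a three-slot accumulator (objective: alternative); return values proved equal.
-- str(u) on a str is the identity; usecases is a list here, so the isinstance branch is dead.
-- Indexing usecase_list[i] occurs only in branches where i < n, so pyGet? is in range; .getD "" never fires.
def split_usecases (usecases : List String) : List (List String) :=
  let usecase_list := (usecases.filter (fun u => u ≠ "")).map (fun u => u)
  let n := usecase_list.length
  if n ≥ 4 then
    [[(PySem.List.pyGet? usecase_list 0).getD ""],
     [(PySem.List.pyGet? usecase_list 1).getD ""],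
     PySem.List.slice usecase_list (some 2) none]
  else if n = 3 then
    [[(PySem.List.pyGet? usecase_list 0).getD ""],
     [(PySem.List.pyGet? usecase_list 1).getD ""],
     [(PySem.List.pyGet? usecase_list 2).getD ""]]
  else if n = 2 then
    [[(PySem.List.pyGet? usecase_list 0).getD ""],
     [(PySem.List.pyGet? usecase_list 1).getD ""],
     []]
  else if n = 1 then
    [[(PySem.List.pyGet? usecase_list 0).getD ""], [], []]
  else [[], [], []]

-- ===== PORT B =====
-- the loop body of Source B: skip falsy strings, drop the item into the first non-full slot
def pvPlace (p : List String × List String × List String) (u : String) :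
    List String × List String × List String :=
  if u = "" then p
  else if p.1 = [] then ([u], p.2.1, p.2.2)
  else if p.2.1 = [] then (p.1, [u], p.2.2)
  else (p.1, p.2.1, p.2.2 ++ [u])

def split_usecases_alt (usecases : List String) : List (List String) :=
  let parts := usecases.foldl pvPlace ([], [], [])
  [parts.1, parts.2.1, parts.2.2]

-- ===== PRECONDITION & SPEC =====
def Spec_split_usecases (usecases : List String) (out : List (List String)) : Prop := out = split_usecases_alt usecases
instance (usecases : List String) (out : List (List String)) : Decidable (Spec_split_usecases usecases out) := by unfold Spec_split_usecases; infer_instance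

-- ===== CLAIM (what is proved, stated in full; the proofs are below) =====
def Claim_equal_split_usecases : Prop := ∀ (usecases : List String), Dom_split_usecases usecases → Spec_split_usecases usecases (split_usecases usecases)

-- ===== LEMMAS AND PROOFS =====
-- folding pvPlace over a list equals folding it over the list with empty strings removed
theorem fold_place_filter (l : List String) (init : List String × List String × List String) :
    l.foldl pvPlace init = (l.filter (fun u => u ≠ "")).foldl pvPlace init := by
  induction l generalizing init with
  | nil => rfl
  | cons a t ih =>
    by_cases ha : a = ""
    · simp [ha, pvPlace, ih]
    · simp [ha, ih]

-- once both unit slots are occupied, the remaining (nonempty) items are appended to slot 3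
theorem fold_place_full (l : List String) (hl : ∀ u ∈ l, u ≠ "") (a b : String)
    (acc : List String) :
    l.foldl pvPlace ([a], [b], acc) = ([a], [b], acc ++ l) := by
  induction l generalizing acc with
  | nil => simp
  | cons c t ih =>
    have hc : c ≠ "" := hl c (by simp)
    have step : pvPlace ([a], [b], acc) c = ([a], [b], acc ++ [c]) := by
      simp [pvPlace, hc]
    rw [List.foldl_cons, step, ih (fun u hu => hl u (by simp [hu]))]
    simp

-- ===== VERDICT (by name: the statement is the Claim_ definition above) =====
theorem split_usecases_spec : Claim_equal_split_usecases := by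
  intro usecases _
  unfold Spec_split_usecases split_usecases split_usecases_alt
  rw [fold_place_filter]
  have hall : ∀ u ∈ usecases.filter (fun u => u ≠ ""), u ≠ "" := by
    intro u hu
    simpa using (List.of_mem_filter hu)
  generalize hl : usecases.filter (fun u => u ≠ "") = l at hall ⊢
  match l, hall with
  | [], _ => decide
  | [a], h =>
    have ha : a ≠ "" := h a (by simp)
    simp [pvPlace, ha, PySem.List.pyGet?, PySem.List.pyIdx?]
  | [a, b], h =>
    have ha : a ≠ "" := h a (by simp)
    have hb : b ≠ "" := h b (by simp)
    simp [pvPlace, ha, hb, PySem.List.pyGet?, PySem.List.pyIdx?]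
  | [a, b, c], h =>
    have ha : a ≠ "" := h a (by simp)
    have hb : b ≠ "" := h b (by simp)
    have hc : c ≠ "" := h c (by simp)
    simp [pvPlace, ha, hb, hc, PySem.List.pyGet?, PySem.List.pyIdx?]
  | a :: b :: c :: d :: rest, h =>
    have ha : a ≠ "" := h a (by simp)
    have hb : b ≠ "" := h b (by simp)
    have h4 : (a :: b :: c :: d :: rest).length ≥ 4 := by simp
    have s1 : pvPlace ([], [], []) a = ([a], [], []) := by simp [pvPlace, ha]
    have s2 : pvPlace ([a], [], []) b = ([a], [b], []) := by simp [pvPlace, hb]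
    have fold_eq : List.foldl pvPlace ([], [], []) (a :: b :: c :: d :: rest)
        = ([a], [b], c :: d :: rest) := by
      rw [List.foldl_cons, s1, List.foldl_cons, s2,
        fold_place_full (c :: d :: rest) (fun u hu => h u (by simp [hu])) a b []]
      rfl
    simp only [List.map_id', if_pos h4, fold_eq]
    have h0 : (0:Int) ≤ (rest.length:Int) + 1 + 1 + 1 := by positivity
    have h1 : (0:Int) ≤ (rest.length:Int) + 1 + 1 := by positivity
    simp [PySem.List.pyGet?, PySem.List.pyIdx?, PySem.List.slice, PySem.List.clampIdx, h0, h1]
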